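-- pv_equiv track=rewrite | github.com/meetchen/Regional-variable-speed-limit-mode | Module/CWeatherCommute.py | find_nearest_camera
-- ===== SOURCE A (Python) =====
-- def find_nearest_camera(camera_num_list, message_boards_num_list):
--     """
--
--     :param camera_num_list: 摄像机的桩号列表
--     :param message_boards_num_list: 情报板的桩号列表
--     :return: 每个情报板距离最近的摄像机的数组下标
--     """
--     nearest_index_list = []
--     for message_board in message_boards_num_list:
--         min_distance = float('inf')
--         nearest_index = None
--         i = 0
--         for camera in camera_num_list:
--             i += 1
--             distance = abs(camera - message_board)
--             if distance < min_distance: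
--                 min_distance = distance
--                 nearest_index = i
--         nearest_index_list.append(nearest_index)
--     return nearest_index_list
-- ===== SOURCE B (Python) =====
-- def find_nearest_camera(camera_num_list, message_boards_num_list):
--     # Sort the distinct camera positions once, binary-search each message board,
--     # and resolve ties toward the earliest (1-based) camera index.
--     first_index = {}
--     for i, v in enumerate(camera_num_list):
--         if v not in first_index:
--             first_index[v] = i + 1
--     values = sorted(first_index)
--     n = len(values)
--     result = []
--     for b in message_boards_num_list:
--         if n == 0:
--             result.append(None)
--             continue
--         lo, hi = 0, n
--         while lo < hi:
--             mid = (lo + hi) // 2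
--             if values[mid] < b:
--                 lo = mid + 1
--             else:
--                 hi = mid
--         if lo == 0:
--             result.append(first_index[values[0]])
--         elif lo == n:
--             result.append(first_index[values[n - 1]])
--         else:
--             v1, v2 = values[lo - 1], values[lo]
--             d1, d2 = b - v1, v2 - b
--             if d1 < d2:
--                 result.append(first_index[v1])
--             elif d2 < d1:
--                 result.append(first_index[v2])
--             else:
--                 result.append(min(first_index[v1], first_index[v2]))
--     return result
-- ===== Notes on version B (the rewrite author's own statement) =====
-- stated objective: faster
-- what changed: Instead of scanning every camera for every board (O(M*N)), B builds a first-occurrence index for the distinct camera positions once, sorts them, and binary-searches each board's position, comparing only the two neighbouring values and breaking ties toward the earliest 1-based camera index.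
import Mathlib
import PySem

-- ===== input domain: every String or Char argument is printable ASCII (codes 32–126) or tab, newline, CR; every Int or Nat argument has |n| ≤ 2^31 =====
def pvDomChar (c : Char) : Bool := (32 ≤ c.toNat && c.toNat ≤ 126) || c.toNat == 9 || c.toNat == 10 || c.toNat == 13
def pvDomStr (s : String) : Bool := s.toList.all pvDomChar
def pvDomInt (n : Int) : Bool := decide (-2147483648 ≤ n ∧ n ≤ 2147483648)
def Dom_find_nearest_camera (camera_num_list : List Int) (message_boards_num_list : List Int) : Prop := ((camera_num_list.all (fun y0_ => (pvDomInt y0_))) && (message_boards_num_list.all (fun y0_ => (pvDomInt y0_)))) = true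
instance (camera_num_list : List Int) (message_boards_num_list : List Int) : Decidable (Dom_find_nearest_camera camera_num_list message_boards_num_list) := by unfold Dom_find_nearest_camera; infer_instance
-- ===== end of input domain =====

-- B replaces A's per-board scan of all cameras by one sort of the distinct camera
-- positions plus a binary search per board (objective: faster, asymptotic).

-- ===== PORT A =====
-- Inner loop state (min_distance, nearest_index, i); Python's float('inf') initial
-- min_distance is encoded as `none` (distances are ints, so `d < inf` is true iff the
-- state is still `none` — exact for this function).
def fncStep (message_board : Int) (st : Option Int × Option Int × Int) (cam : Int) :
    Option Int × Option Int × Int :=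
  let i := st.2.2 + 1
  let distance := |cam - message_board|
  if (match st.1 with
      | none => true
      | some m => decide (distance < m)) then
    (some distance, some i, i)
  else (st.1, st.2.1, i)

def fncInner (camera_num_list : List Int) (message_board : Int) :
    Option Int × Option Int × Int :=
  camera_num_list.foldl (fncStep message_board) (none, none, 0)

def find_nearest_camera (camera_num_list : List Int) (message_boards_num_list : List Int) : List (Option Int) :=
  message_boards_num_list.foldl
    (fun nearest_index_list message_board =>
      nearest_index_list ++ [(fncInner camera_num_list message_board).2.1])
    []

-- ===== PORT B =====
-- first_index: value -> 1-based index of its first occurrence (insert-if-absent loop).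
def fncFirstIndex (camera_num_list : List Int) : PySem.Dict Int Int :=
  (PySem.List.enumerate camera_num_list).foldl
    (fun d p => if d.contains p.2 then d else d.insert p.2 (p.1 + 1))
    PySem.Dict.empty

-- the hand-written bisect_left while-loop of Source B (fuel = hi - lo at the call site)
def fncBisect (values : List Int) (b : Int) : Nat → Nat → Nat → Nat
  | 0, lo, _ => lo
  | fuel + 1, lo, hi =>
    if lo < hi then
      match values[(lo + hi) / 2]? with
      | some y => if y < b then fncBisect values b fuel ((lo + hi) / 2 + 1) hi
                  else fncBisect values b fuel lo ((lo + hi) / 2)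
      | none => lo
    else lo

-- one board: binary search among the sorted distinct values, then pick among the two
-- neighbours (dict / list accesses are in range wherever evaluated, so getD/pyGetD are exact).
def fncNearest (first_index : PySem.Dict Int Int) (values : List Int) (b : Int) : Option Int :=
  let n := values.length
  if n = 0 then none
  else
    let lo := fncBisect values b n 0 n
    if lo = 0 then some (first_index.getD (PySem.List.pyGetD values 0 0) 0)
    else if lo = n then some (first_index.getD (PySem.List.pyGetD values ((n : Int) - 1) 0) 0)
    else
      let v1 := PySem.List.pyGetD values ((lo : Int) - 1) 0
      let v2 := PySem.List.pyGetD values (lo : Int) 0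
      let d1 := b - v1
      let d2 := v2 - b
      if d1 < d2 then some (first_index.getD v1 0)
      else if d2 < d1 then some (first_index.getD v2 0)
      else some (min (first_index.getD v1 0) (first_index.getD v2 0))

def find_nearest_camera_alt (camera_num_list : List Int) (message_boards_num_list : List Int) : List (Option Int) :=
  let first_index := fncFirstIndex camera_num_list
  let values := PySem.List.sorted first_index.keys (fun x => x) false
  message_boards_num_list.foldl
    (fun result b => result ++ [fncNearest first_index values b])
    []

-- ===== PRECONDITION & SPEC =====
def Spec_find_nearest_camera (camera_num_list : List Int) (message_boards_num_list : List Int) (out : List (Option Int)) : Prop := out = find_nearest_camera_alt camera_num_list message_boards_num_list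
instance (camera_num_list : List Int) (message_boards_num_list : List Int) (out : List (Option Int)) : Decidable (Spec_find_nearest_camera camera_num_list message_boards_num_list out) := by unfold Spec_find_nearest_camera; infer_instance

-- ===== CLAIM (what is proved, stated in full; the proofs are below) =====
def Claim_equal_find_nearest_camera : Prop := ∀ (camera_num_list : List Int) (message_boards_num_list : List Int), Dom_find_nearest_camera camera_num_list message_boards_num_list → Spec_find_nearest_camera camera_num_list message_boards_num_list (find_nearest_camera camera_num_list message_boards_num_list)

-- ===== LEMMAS AND PROOFS =====

-- the common specification: j is the (0-based) position of the first camera at minimal distance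
def FirstArgmin (cams : List Int) (b : Int) (j : Nat) : Prop :=
  ∃ hj : j < cams.length,
    (∀ t (ht : t < cams.length), |cams[j] - b| ≤ |cams[t] - b|) ∧
    (∀ t (ht : t < j), |cams[j] - b| < |cams[t]'(lt_trans ht hj) - b|)

theorem firstArgmin_unique {cams : List Int} {b : Int} {j j' : Nat}
    (h : FirstArgmin cams b j) (h' : FirstArgmin cams b j') : j = j' := by
  obtain ⟨hj, hmin, hfirst⟩ := h
  obtain ⟨hj', hmin', hfirst'⟩ := h'
  by_contra hne
  rcases Nat.lt_or_ge j j' with hlt | hge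
  · exact absurd (hmin j' hj') (not_le.mpr (hfirst' j hlt))
  · have hlt : j' < j := lt_of_le_of_ne hge (fun e => hne e.symm)
    exact absurd (hmin' j hj) (not_le.mpr (hfirst j' hlt))

-- ---- A side ----
-- pure shadow of A's inner loop once min_distance is a real integer
def goA (b : Int) : List Int → Int → Int → Int → Int × Int
  | [], m, k, _ => (m, k)
  | c :: cs, m, k, i =>
    if |c - b| < m then goA b cs |c - b| (i + 1) (i + 1) else goA b cs m k (i + 1)

theorem fold_eq_goA (b : Int) : ∀ (cs : List Int) (m k i : Int),
    cs.foldl (fncStep b) (some m, some k, i)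
      = (some (goA b cs m k i).1, some (goA b cs m k i).2, i + cs.length) := by
  intro cs
  induction cs with
  | nil => intro m k i; simp [goA]
  | cons c cs ih =>
    intro m k i
    rw [List.foldl_cons]
    by_cases h : |c - b| < m
    · have hd : fncStep b (some m, some k, i) c = (some (|c - b|), some (i + 1), i + 1) := by
        simp [fncStep, h]
      rw [hd, ih]
      simp only [goA, if_pos h, List.length_cons, Prod.mk.injEq, true_and]
      push_cast; ring
    · have hd : fncStep b (some m, some k, i) c = (some m, some k, i + 1) := by
        simp [fncStep, h]
      rw [hd, ih]
      simp only [goA, if_neg h, List.length_cons, Prod.mk.injEq, true_and]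
      push_cast; ring

theorem goA_spec (b : Int) : ∀ (cs : List Int) (m k i : Int),
    (goA b cs m k i = (m, k) ∧ ∀ c ∈ cs, m ≤ |c - b|)
    ∨ (∃ t, ∃ ht : t < cs.length,
        goA b cs m k i = (|cs[t] - b|, i + t + 1)
        ∧ |cs[t] - b| < m
        ∧ (∀ u (hu : u < cs.length), |cs[t] - b| ≤ |cs[u] - b|)
        ∧ (∀ u (hu : u < t), |cs[t] - b| < |cs[u]'(lt_trans hu ht) - b|)) := by
  intro cs
  induction cs with
  | nil => intro m k i; left; simp [goA]
  | cons c cs ih =>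
    intro m k i
    by_cases h : |c - b| < m
    · right
      rcases ih (|c - b|) (i + 1) (i + 1) with ⟨heq, hall⟩ | ⟨t, ht, heq, hlt, hmin, hfst⟩
      · refine ⟨0, by simp, ?_, ?_, ?_, ?_⟩
        · simp [goA, h, heq]
        · simpa using h
        · intro u hu
          cases u with
          | zero => simp
          | succ u =>
            have hu' : u < cs.length := by simpa using hu
            simpa using hall cs[u] (List.getElem_mem hu')
        · intro u hu; omega
      · refine ⟨t + 1, by simpa using Nat.succ_lt_succ ht, ?_, ?_, ?_, ?_⟩
        · simp only [goA, if_pos h, List.getElem_cons_succ, heq, Prod.mk.injEq, true_and]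
          push_cast; ring
        · simpa using lt_trans hlt h
        · intro u hu
          cases u with
          | zero => simpa using le_of_lt hlt
          | succ u => simpa using hmin u (by simpa using Nat.lt_of_succ_lt_succ hu)
        · intro u hu
          cases u with
          | zero => simpa using hlt
          | succ u => simpa using hfst u (Nat.lt_of_succ_lt_succ hu)
    · rcases ih m k (i + 1) with ⟨heq, hall⟩ | ⟨t, ht, heq, hlt, hmin, hfst⟩
      · left
        refine ⟨by simp [goA, h, heq], ?_⟩
        intro c' hc'
        rcases List.mem_cons.mp hc' with rfl | hc'
        · exact le_of_not_gt h
        · exact hall c' hc'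
      · right
        refine ⟨t + 1, by simpa using Nat.succ_lt_succ ht, ?_, ?_, ?_, ?_⟩
        · simp only [goA, if_neg h, List.getElem_cons_succ, heq, Prod.mk.injEq, true_and]
          push_cast; ring
        · simpa using hlt
        · intro u hu
          cases u with
          | zero => simpa using le_of_lt (lt_of_lt_of_le hlt (le_of_not_gt h))
          | succ u => simpa using hmin u (by simpa using Nat.lt_of_succ_lt_succ hu)
        · intro u hu
          cases u with
          | zero => simpa using lt_of_lt_of_le hlt (le_of_not_gt h)
          | succ u => simpa using hfst u (Nat.lt_of_succ_lt_succ hu)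

theorem A_side (cams : List Int) (b : Int) (hne : cams ≠ []) :
    ∃ j : Nat, FirstArgmin cams b j ∧ (fncInner cams b).2.1 = some ((j : Int) + 1) := by
  obtain ⟨c, cs, rfl⟩ := List.exists_cons_of_ne_nil hne
  have hstep : fncInner (c :: cs) b = cs.foldl (fncStep b) (some (|c - b|), some 1, 1) := by
    have hd : fncStep b (none, none, 0) c = (some (|c - b|), some 1, 1) := by
      simp [fncStep]
    rw [fncInner, List.foldl_cons, hd]
  rw [hstep, fold_eq_goA b cs (|c - b|) 1 1]
  rcases goA_spec b cs (|c - b|) 1 1 with ⟨heq, hall⟩ | ⟨t, ht, heq, hlt, hmin, hfst⟩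
  · refine ⟨0, ⟨by simp, ?_, ?_⟩, by simp [heq]⟩
    · intro u hu
      cases u with
      | zero => simp
      | succ u =>
        have hu' : u < cs.length := by simpa using hu
        simpa using hall cs[u] (List.getElem_mem hu')
    · intro u hu; omega
  · refine ⟨t + 1, ⟨by simpa using Nat.succ_lt_succ ht, ?_, ?_⟩, ?_⟩
    · intro u hu
      cases u with
      | zero => simpa using le_of_lt hlt
      | succ u => simpa using hmin u (by simpa using Nat.lt_of_succ_lt_succ hu)
    · intro u hu
      cases u with
      | zero => simpa using hlt
      | succ u => simpa using hfst u (Nat.lt_of_succ_lt_succ hu)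
    · simp only [heq]
      push_cast
      congr 1
      ring

theorem A_side_nil (b : Int) : (fncInner [] b).2.1 = none := rfl

-- ---- B side ----
-- the insert-if-absent loop looks up to the FIRST occurrence index
theorem fi_fold_get? : ∀ (cs : List Int) (s : Int) (d : PySem.Dict Int Int) (v : Int),
    ((PySem.List.enumerate cs s).foldl
        (fun d p => if d.contains p.2 then d else d.insert p.2 (p.1 + 1)) d).get? v
      = (d.get? v).or ((List.idxOf? v cs).map (fun k => s + (k : Int) + 1)) := by
  intro cs
  induction cs with
  | nil => intro s d v; simp [PySem.List.enumerate_nil]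
  | cons c cs ih =>
    intro s d v
    rw [PySem.List.enumerate_cons, List.foldl_cons, ih]
    by_cases hvc : c = v
    · subst hvc
      by_cases hc : d.contains c = true
      · have hsome : (d.get? c).isSome := by
          rw [← PySem.Dict.contains_eq_isSome_get?]; exact hc
        obtain ⟨w, hw⟩ := Option.isSome_iff_exists.mp hsome
        simp [hc, hw, List.idxOf?_cons]
      · simp only [hc, if_false, Bool.false_eq_true, PySem.Dict.get?_insert_self,
          Option.some_or, List.idxOf?_cons, BEq.rfl, if_true]
        have hd : d.get? c = none := by
          cases h : d.get? c with
          | none => rfl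
          | some w => rw [PySem.Dict.contains_eq_isSome_get?, h] at hc; simp at hc
        simp [hd]
    · have hbeq : (c == v) = false := by simpa using hvc
      have hget : (if d.contains c = true then d else d.insert c (s + 1)).get? v = d.get? v := by
        split_ifs with hc
        · rfl
        · exact PySem.Dict.get?_insert_of_ne d _ (fun h => hvc h.symm)
      rw [hget, List.idxOf?_cons]
      simp only [hbeq, Bool.false_eq_true, if_false]
      cases List.idxOf? v cs with
      | none => simp
      | some k => simp; congr 1; omega

theorem fi_fold_nodup : ∀ (cs : List Int) (s : Int) (d : PySem.Dict Int Int),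
    d.keys.Nodup →
    ((PySem.List.enumerate cs s).foldl
        (fun d p => if d.contains p.2 then d else d.insert p.2 (p.1 + 1)) d).keys.Nodup := by
  intro cs
  induction cs with
  | nil => intro s d h; simpa [PySem.List.enumerate_nil] using h
  | cons c cs ih =>
    intro s d h
    rw [PySem.List.enumerate_cons, List.foldl_cons]
    apply ih
    split_ifs with hc
    · exact h
    · rw [PySem.Dict.keys_insert_of_not_contains d _ (by simpa using hc)]
      have hcm : c ∉ d.keys := by
        rw [← PySem.Dict.contains_iff_mem_keys]
        simp [hc]
      refine List.Nodup.append h (List.nodup_singleton c) ?_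
      intro a ha hb
      simp only [List.mem_singleton] at hb
      subst hb
      exact hcm ha

theorem fi_get? (cams : List Int) (v : Int) :
    (fncFirstIndex cams).get? v = (List.idxOf? v cams).map (fun k => (k : Int) + 1) := by
  rw [fncFirstIndex, fi_fold_get? cams 0 PySem.Dict.empty v]
  simp [PySem.Dict.get?_empty]

theorem fi_nodup (cams : List Int) : (fncFirstIndex cams).keys.Nodup :=
  fi_fold_nodup cams 0 PySem.Dict.empty PySem.Dict.nodup_keys_empty

theorem fi_mem_keys (cams : List Int) (v : Int) : v ∈ (fncFirstIndex cams).keys ↔ v ∈ cams := by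
  rw [← not_iff_not, ← PySem.Dict.get?_eq_none_iff_not_mem_keys, fi_get?]
  cases h : List.idxOf? v cams with
  | none => simpa [h] using List.idxOf?_eq_none_iff.mp h
  | some k =>
    obtain ⟨hk, he, -⟩ := List.idxOf?_eq_some_iff.mp h
    have hv : v ∈ cams := he ▸ List.getElem_mem hk
    simp [hv]

theorem fi_getD (cams : List Int) (v : Int) (j : Nat) (hj : List.idxOf? v cams = some j) :
    (fncFirstIndex cams).getD v 0 = (j : Int) + 1 := by
  have : (fncFirstIndex cams).getD v 0 = ((fncFirstIndex cams).get? v).getD 0 := rfl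
  rw [this, fi_get?, hj]
  rfl

-- the binary-search while-loop of Source B is PySem's bisect_left loop
theorem fncBisect_eq_loop (xs : List Int) (x : Int) :
    ∀ (fuel lo hi : Nat), fncBisect xs x fuel lo hi = PySem.List.bisectLeftLoop xs x fuel lo hi := by
  intro fuel
  induction fuel with
  | zero => intro lo hi; rfl
  | succ fuel ih =>
    intro lo hi
    rw [fncBisect, PySem.List.bisectLeftLoop]
    split_ifs with h
    · rcases hget : xs[(lo + hi) / 2]? with _ | y
      · rfl
      · simp only [ih]
    · rfl

theorem fncBisect_eq_bisectLeft (xs : List Int) (x : Int) :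
    fncBisect xs x xs.length 0 xs.length = PySem.List.bisectLeft xs x :=
  fncBisect_eq_loop xs x xs.length 0 xs.length

-- choosing the earlier first-occurrence among (at most two) values at minimal distance
-- yields the first argmin of the whole camera list
theorem pickFA (cams : List Int) (b v1 v2 : Int) (j1 j2 : Nat)
    (h1 : List.idxOf? v1 cams = some j1) (h2 : List.idxOf? v2 cams = some j2)
    (hmin : ∀ w ∈ cams, |v1 - b| ≤ |w - b|)
    (h2d : |v2 - b| = |v1 - b|)
    (huni : ∀ w ∈ cams, |w - b| = |v1 - b| → w = v1 ∨ w = v2) :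
    FirstArgmin cams b (min j1 j2) := by
  obtain ⟨hj1, he1, hf1⟩ := List.idxOf?_eq_some_iff.mp h1
  obtain ⟨hj2, he2, hf2⟩ := List.idxOf?_eq_some_iff.mp h2
  have hj : min j1 j2 < cams.length := lt_of_le_of_lt (Nat.min_le_left _ _) hj1
  have hdj : |cams[min j1 j2]'hj - b| = |v1 - b| := by
    rcases Nat.le_total j1 j2 with h | h
    · have : min j1 j2 = j1 := Nat.min_eq_left h
      simp only [this] at hj ⊢
      rw [he1]
    · have : min j1 j2 = j2 := Nat.min_eq_right h
      simp only [this] at hj ⊢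
      rw [he2, h2d]
  refine ⟨hj, ?_, ?_⟩
  · intro t ht
    rw [hdj]
    exact hmin cams[t] (List.getElem_mem ht)
  · intro t htj
    have htlen : t < cams.length := lt_trans htj hj
    have hle := hmin cams[t] (List.getElem_mem htlen)
    rw [hdj]
    by_contra hnot
    have heq : |cams[t]'htlen - b| = |v1 - b| := le_antisymm (not_lt.mp hnot) hle
    rcases huni cams[t] (List.getElem_mem htlen) heq with h | h
    · exact hf1 t (lt_of_lt_of_le htj (Nat.min_le_left _ _)) h
    · exact hf2 t (lt_of_lt_of_le htj (Nat.min_le_right _ _)) h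

theorem B_side (cams : List Int) (b : Int) (hne : cams ≠ []) :
    ∃ j : Nat, FirstArgmin cams b j ∧
      fncNearest (fncFirstIndex cams)
        (PySem.List.sorted (fncFirstIndex cams).keys (fun x => x) false) b
        = some ((j : Int) + 1) := by
  set fi := fncFirstIndex cams with hfi
  set vs := PySem.List.sorted fi.keys (fun x => x) false with hvs
  have hmemvs : ∀ v : Int, v ∈ vs ↔ v ∈ cams := by
    intro v
    rw [hvs, PySem.List.mem_sorted, hfi]
    exact fi_mem_keys cams v
  have hidx : ∀ v : Int, v ∈ cams → ∃ j, List.idxOf? v cams = some j := by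
    intro v hv
    cases h : List.idxOf? v cams with
    | none => exact absurd hv (List.idxOf?_eq_none_iff.mp h)
    | some j => exact ⟨j, rfl⟩
  have hnd : vs.Nodup :=
    (PySem.List.sorted_perm fi.keys (fun x => x) false).symm.nodup (hfi ▸ fi_nodup cams)
  have hpl : vs.Pairwise (· < ·) := by
    have hle := PySem.List.sorted_pairwise fi.keys (fun x => x)
    exact (List.Pairwise.and hle hnd).imp (fun h => lt_of_le_of_ne h.1 h.2)
  have hple : vs.Pairwise (· ≤ ·) := hpl.imp le_of_lt
  set lo := PySem.List.bisectLeft vs b with hlodef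
  obtain ⟨hlon, hblt, hbge⟩ := PySem.List.bisectLeft_spec vs b hple
  have hvsne : vs ≠ [] := by
    obtain ⟨c, cs', rfl⟩ := List.exists_cons_of_ne_nil hne
    exact List.ne_nil_of_mem ((hmemvs c).mpr (List.mem_cons_self))
  have hn : 0 < vs.length := List.length_pos_iff.mpr hvsne
  have hmono : ∀ p q (hq : q < vs.length) (hpq : p ≤ q),
      vs[p]'(lt_of_le_of_lt hpq hq) ≤ vs[q]'hq := by
    intro p q hq hpq
    rcases Nat.eq_or_lt_of_le hpq with rfl | h
    · exact le_refl _
    · exact le_of_lt (List.pairwise_iff_getElem.mp hpl p q (lt_of_le_of_lt hpq hq) hq h)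
  have hgd : ∀ (u : Nat) (hu : u < vs.length), ∃ j, List.idxOf? (vs[u]'hu) cams = some j :=
    fun u hu => hidx _ ((hmemvs _).mp (List.getElem_mem hu))
  have hbiseq : fncBisect vs b vs.length 0 vs.length = lo :=
    (fncBisect_eq_bisectLeft vs b).trans hlodef.symm
  have hgetDv : ∀ (v : Int) (j : Nat), List.idxOf? v cams = some j → fi.getD v 0 = (j : Int) + 1 := by
    intro v j hj
    rw [hfi]
    exact fi_getD cams v j hj
  simp only [fncNearest]
  rw [hbiseq, if_neg (by omega : ¬ vs.length = 0)]
  by_cases h0 : lo = 0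
  · rw [if_pos h0]
    have hv0 : PySem.List.pyGetD vs 0 0 = vs[0]'hn := by
      have h := PySem.List.pyGetD_eq_getElem vs (i := 0) 0 (by omega) (by exact_mod_cast hn)
      simpa using h
    obtain ⟨j, hj⟩ := hgd 0 hn
    have hvb : b ≤ vs[0]'hn := hbge 0 hn (by omega)
    have hkey : ∀ w ∈ cams, |vs[0]'hn - b| ≤ |w - b| ∧ (|w - b| = |vs[0]'hn - b| → w = vs[0]'hn) := by
      intro w hw
      obtain ⟨u, hu, rfl⟩ := List.mem_iff_getElem.mp ((hmemvs w).mpr hw)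
      have h1 : vs[0]'hn ≤ vs[u]'hu := hmono 0 u hu (Nat.zero_le u)
      have e1 : |vs[0]'hn - b| = vs[0]'hn - b := abs_of_nonneg (by omega)
      have e2 : |vs[u]'hu - b| = vs[u]'hu - b := abs_of_nonneg (by omega)
      refine ⟨by rw [e1, e2]; omega, ?_⟩
      intro he
      rw [e1, e2] at he
      omega
    have hFA := pickFA cams b _ _ j j hj hj (fun w hw => (hkey w hw).1) rfl
      (fun w hw he => Or.inl ((hkey w hw).2 he))
    rw [Nat.min_self] at hFA
    exact ⟨j, hFA, by rw [hv0, hgetDv _ j hj]⟩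
  · by_cases hN : lo = vs.length
    · rw [if_neg h0, if_pos hN]
      have hnn : vs.length - 1 < vs.length := by omega
      have hvN : PySem.List.pyGetD vs ((vs.length : Int) - 1) 0 = vs[vs.length - 1]'hnn := by
        have h := PySem.List.pyGetD_eq_getElem vs (i := (vs.length : Int) - 1) 0
          (by omega) (by omega)
        rw [h]
        congr 1
        omega
      obtain ⟨j, hj⟩ := hgd (vs.length - 1) hnn
      have hvb : vs[vs.length - 1]'hnn < b := hblt (vs.length - 1) hnn (by omega)
      have hkey : ∀ w ∈ cams, |vs[vs.length - 1]'hnn - b| ≤ |w - b| ∧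
          (|w - b| = |vs[vs.length - 1]'hnn - b| → w = vs[vs.length - 1]'hnn) := by
        intro w hw
        obtain ⟨u, hu, rfl⟩ := List.mem_iff_getElem.mp ((hmemvs w).mpr hw)
        have h1 : vs[u]'hu ≤ vs[vs.length - 1]'hnn := hmono u (vs.length - 1) hnn (by omega)
        have e1 : |vs[vs.length - 1]'hnn - b| = b - vs[vs.length - 1]'hnn := by
          rw [abs_of_neg (by omega)]; ring
        have e2 : |vs[u]'hu - b| = b - vs[u]'hu := by
          rw [abs_of_neg (by omega)]; ring
        refine ⟨by rw [e1, e2]; omega, ?_⟩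
        intro he
        rw [e1, e2] at he
        omega
      have hFA := pickFA cams b _ _ j j hj hj (fun w hw => (hkey w hw).1) rfl
        (fun w hw he => Or.inl ((hkey w hw).2 he))
      rw [Nat.min_self] at hFA
      exact ⟨j, hFA, by rw [hvN, hgetDv _ j hj]⟩
    · have hlo1 : 0 < lo := Nat.pos_of_ne_zero h0
      have hloN : lo < vs.length := lt_of_le_of_ne hlon hN
      have hlo1N : lo - 1 < vs.length := by omega
      rw [if_neg h0, if_neg hN]
      have hv1 : PySem.List.pyGetD vs ((lo : Int) - 1) 0 = vs[lo - 1]'hlo1N := by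
        have h := PySem.List.pyGetD_eq_getElem vs (i := (lo : Int) - 1) 0 (by omega) (by omega)
        rw [h]
        congr 1
        omega
      have hv2 : PySem.List.pyGetD vs (lo : Int) 0 = vs[lo]'hloN := by
        have h := PySem.List.pyGetD_eq_getElem vs (i := (lo : Int)) 0 (by omega) (by omega)
        rw [h]
        congr 1
      rw [hv1, hv2]
      obtain ⟨j1, hj1⟩ := hgd (lo - 1) hlo1N
      obtain ⟨j2, hj2⟩ := hgd lo hloN
      have hv1b : vs[lo - 1]'hlo1N < b := hblt (lo - 1) hlo1N (by omega)
      have hv2b : b ≤ vs[lo]'hloN := hbge lo hloN (le_refl lo)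
      have e1 : |vs[lo - 1]'hlo1N - b| = b - vs[lo - 1]'hlo1N := by
        rw [abs_of_neg (by omega)]; ring
      have e2 : |vs[lo]'hloN - b| = vs[lo]'hloN - b := abs_of_nonneg (by omega)
      have hdich : ∀ w ∈ cams,
          (w ≤ vs[lo - 1]'hlo1N ∧ |w - b| = b - w) ∨ (vs[lo]'hloN ≤ w ∧ |w - b| = w - b) := by
        intro w hw
        obtain ⟨u, hu, rfl⟩ := List.mem_iff_getElem.mp ((hmemvs w).mpr hw)
        by_cases hul : u < lo
        · left
          have h1 : vs[u]'hu ≤ vs[lo - 1]'hlo1N := hmono u (lo - 1) hlo1N (by omega)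
          exact ⟨h1, by rw [abs_of_neg (by omega)]; ring⟩
        · right
          have h1 : vs[lo]'hloN ≤ vs[u]'hu := hmono lo u hu (by omega)
          exact ⟨h1, abs_of_nonneg (by omega)⟩
      by_cases hd : b - vs[lo - 1]'hlo1N < vs[lo]'hloN - b
      · rw [if_pos hd]
        have hkey : ∀ w ∈ cams, |vs[lo - 1]'hlo1N - b| ≤ |w - b| ∧
            (|w - b| = |vs[lo - 1]'hlo1N - b| → w = vs[lo - 1]'hlo1N) := by
          intro w hw
          rcases hdich w hw with ⟨h1, h2⟩ | ⟨h1, h2⟩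
          · exact ⟨by rw [e1, h2]; omega, fun he => by rw [e1, h2] at he; omega⟩
          · exact ⟨by rw [e1, h2]; omega, fun he => by rw [e1, h2] at he; omega⟩
        have hFA := pickFA cams b _ _ j1 j1 hj1 hj1 (fun w hw => (hkey w hw).1) rfl
          (fun w hw he => Or.inl ((hkey w hw).2 he))
        rw [Nat.min_self] at hFA
        exact ⟨j1, hFA, by rw [hgetDv _ j1 hj1]⟩
      · by_cases hd2 : vs[lo]'hloN - b < b - vs[lo - 1]'hlo1N
        · rw [if_neg hd, if_pos hd2]
          have hkey : ∀ w ∈ cams, |vs[lo]'hloN - b| ≤ |w - b| ∧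
              (|w - b| = |vs[lo]'hloN - b| → w = vs[lo]'hloN) := by
            intro w hw
            rcases hdich w hw with ⟨h1, h2⟩ | ⟨h1, h2⟩
            · exact ⟨by rw [e2, h2]; omega, fun he => by rw [e2, h2] at he; omega⟩
            · exact ⟨by rw [e2, h2]; omega, fun he => by rw [e2, h2] at he; omega⟩
          have hFA := pickFA cams b _ _ j2 j2 hj2 hj2 (fun w hw => (hkey w hw).1) rfl
            (fun w hw he => Or.inl ((hkey w hw).2 he))
          rw [Nat.min_self] at hFA
          exact ⟨j2, hFA, by rw [hgetDv _ j2 hj2]⟩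
        · rw [if_neg hd, if_neg hd2]
          have hteq : vs[lo]'hloN - b = b - vs[lo - 1]'hlo1N := by omega
          have hkey : ∀ w ∈ cams, |vs[lo - 1]'hlo1N - b| ≤ |w - b| ∧
              (|w - b| = |vs[lo - 1]'hlo1N - b| → w = vs[lo - 1]'hlo1N ∨ w = vs[lo]'hloN) := by
            intro w hw
            rcases hdich w hw with ⟨h1, h2⟩ | ⟨h1, h2⟩
            · exact ⟨by rw [e1, h2]; omega, fun he => Or.inl (by rw [e1, h2] at he; omega)⟩
            · exact ⟨by rw [e1, h2]; omega, fun he => Or.inr (by rw [e1, h2] at he; omega)⟩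
          have hFA := pickFA cams b _ _ j1 j2 hj1 hj2 (fun w hw => (hkey w hw).1)
            (by rw [e1, e2]; omega) (fun w hw he => (hkey w hw).2 he)
          refine ⟨min j1 j2, hFA, ?_⟩
          rw [hgetDv _ j1 hj1, hgetDv _ j2 hj2]
          congr 1
          rcases Nat.le_total j1 j2 with h | h
          · rw [Nat.min_eq_left h, min_eq_left (by omega : (j1 : Int) + 1 ≤ (j2 : Int) + 1)]
          · rw [Nat.min_eq_right h, min_eq_right (by omega : (j2 : Int) + 1 ≤ (j1 : Int) + 1)]

theorem B_side_nil (b : Int) :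
    fncNearest (fncFirstIndex []) (PySem.List.sorted (fncFirstIndex []).keys (fun x => x) false) b = none := rfl

-- ===== VERDICT (by name: the statement is the Claim_ definition above) =====
theorem find_nearest_camera_spec : Claim_equal_find_nearest_camera := by
  intro cams boards _
  show _ = _
  unfold find_nearest_camera find_nearest_camera_alt
  rw [PySem.List.foldl_append_singleton_eq_map, PySem.List.foldl_append_singleton_eq_map]
  simp only [List.nil_append]
  apply List.map_congr_left
  intro b _
  by_cases hc : cams = []
  · subst hc; rw [A_side_nil, B_side_nil]
  · obtain ⟨j, hfa, hA⟩ := A_side cams b hc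
    obtain ⟨j', hfb, hB⟩ := B_side cams b hc
    rw [hA, hB, firstArgmin_unique hfa hfb]
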